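-- pv_equiv track=rewrite | github.com/opsopsops1/Advent_code_2020 | day17.py | part2
-- ===== SOURCE A (Python) =====
-- d = [-1, 0, 1]
--
-- def part2(actived):
--   for _ in range(6):
--     mark = {}
--     for x, y, z, w in actived:
--       for xi in d:
--         for yi in d:
--           for zi in d:
--             for wi in d:
--               if xi == yi == zi == wi == 0:
--                 continue
--               mark[(x+xi, y+yi, z+zi, w+wi)] = mark.get((x+xi, y+yi, z+zi, w+wi), 0) + 1
--     new_actived = set()
--     for k, v in mark.items():
--       if v == 3:
--         new_actived.add(k)
--       elif v == 2 and k in actived: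
--         new_actived.add(k)
--     actived = new_actived
--   return len(actived)
-- ===== SOURCE B (Python) =====
-- from collections import Counter
--
-- OFFSETS = [(xi, yi, zi, wi)
--            for xi in (-1, 0, 1) for yi in (-1, 0, 1)
--            for zi in (-1, 0, 1) for wi in (-1, 0, 1)
--            if (xi, yi, zi, wi) != (0, 0, 0, 0)]
--
--
-- def part2(actived):
--     occ = Counter(actived)  # multiset of active cells (the input list may repeat cells)
--     for _ in range(6):
--         cands = set()
--         for (x, y, z, w) in occ:
--             for (xi, yi, zi, wi) in OFFSETS:
--                 cands.add((x + xi, y + yi, z + zi, w + wi))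
--         new = set()
--         for (x, y, z, w) in cands:
--             n = sum(occ[(x + xi, y + yi, z + zi, w + wi)] for (xi, yi, zi, wi) in OFFSETS)
--             if n == 3 or (n == 2 and occ[(x, y, z, w)]):
--                 new.add((x, y, z, w))
--         occ = Counter(new)
--     return len(occ)
-- ===== Notes on version B (the rewrite author's own statement) =====
-- stated objective: alternative
-- what changed: Each generation is computed candidate-driven: instead of A's scatter (every active cell increments 80 neighbour marks in a dict that is then filtered), B builds the candidate set of all neighbours and counts each candidate's active neighbours by lookups in a Counter of the current cells.
import Mathlib
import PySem

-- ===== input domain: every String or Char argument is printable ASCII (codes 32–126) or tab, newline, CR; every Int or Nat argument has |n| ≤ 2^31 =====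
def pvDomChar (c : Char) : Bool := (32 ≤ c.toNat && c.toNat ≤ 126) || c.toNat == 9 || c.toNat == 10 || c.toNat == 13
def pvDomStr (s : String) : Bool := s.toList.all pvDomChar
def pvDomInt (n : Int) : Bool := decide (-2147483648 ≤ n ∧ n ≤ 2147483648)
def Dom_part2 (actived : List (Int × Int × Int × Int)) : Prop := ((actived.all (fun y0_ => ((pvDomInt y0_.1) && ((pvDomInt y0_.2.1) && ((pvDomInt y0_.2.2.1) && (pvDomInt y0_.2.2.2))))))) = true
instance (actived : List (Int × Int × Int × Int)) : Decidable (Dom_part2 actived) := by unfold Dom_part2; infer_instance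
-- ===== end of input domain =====

-- B rewrites A's scatter-then-aggregate generation (every active cell writes 80 neighbour marks
-- into a dict, then the dict is filtered) as a candidate-driven gather (build the candidate set,
-- then count each candidate's active neighbours by lookup in a Counter of the current cells);
-- objective: alternative decomposition, same asymptotic cost.

-- ===== PORT A =====
def dlist : List Int := [-1, 0, 1]

-- the 'mark' dict built by the four nested offset loops
def markOf (actived : List (Int × Int × Int × Int)) : PySem.Dict (Int × Int × Int × Int) Int :=
  actived.foldl (fun d c =>
    dlist.foldl (fun d xi =>
      dlist.foldl (fun d yi =>
        dlist.foldl (fun d zi =>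
          dlist.foldl (fun d wi =>
            if xi == 0 && yi == 0 && zi == 0 && wi == 0 then d
            else
              d.insert (c.1 + xi, c.2.1 + yi, c.2.2.1 + zi, c.2.2.2 + wi)
                (d.getD (c.1 + xi, c.2.1 + yi, c.2.2.1 + zi, c.2.2.2 + wi) 0 + 1)) d) d) d) d)
    PySem.Dict.empty

-- one generation: build 'mark', then filter its items into the new active set
def part2_step (actived : List (Int × Int × Int × Int)) : List (Int × Int × Int × Int) :=
  (markOf actived).items.foldl (fun s kv =>
    if kv.2 == 3 then PySem.Set.add s kv.1
    else if kv.2 == 2 && actived.contains kv.1 then PySem.Set.add s kv.1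
    else s) PySem.Set.empty

def part2 (actived : List (Int × Int × Int × Int)) : Int :=
  PySem.List.len ((List.range 6).foldl (fun a _ => part2_step a) actived)

-- ===== PORT B =====
-- OFFSETS from Source B: the 80 non-zero offsets, by the same filtered comprehension
def OFFS : List (Int × Int × Int × Int) :=
  ([-1, 0, 1] : List Int).flatMap (fun xi =>
    ([-1, 0, 1] : List Int).flatMap (fun yi =>
      ([-1, 0, 1] : List Int).flatMap (fun zi =>
        ([-1, 0, 1] : List Int).filterMap (fun wi =>
          if (xi, yi, zi, wi) = ((0 : Int), (0 : Int), (0 : Int), (0 : Int)) then none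
          else some (xi, yi, zi, wi)))))

def addc (c o : Int × Int × Int × Int) : Int × Int × Int × Int :=
  (c.1 + o.1, c.2.1 + o.2.1, c.2.2.1 + o.2.2.1, c.2.2.2 + o.2.2.2)

-- n = sum(occ[q + o] for o in OFFSETS)
def nCount (occ : PySem.Dict (Int × Int × Int × Int) Int) (q : Int × Int × Int × Int) : Int :=
  OFFS.foldl (fun acc o => acc + occ.getD (addc q o) 0) 0

-- cands = the set of all neighbours of current cells
def candsOf (occ : PySem.Dict (Int × Int × Int × Int) Int) : PySem.Set (Int × Int × Int × Int) :=
  occ.keys.foldl (fun s c => OFFS.foldl (fun s o => PySem.Set.add s (addc c o)) s) PySem.Set.empty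

-- new = the candidates satisfying the birth/survival rule, counted against occ
def newOf (occ : PySem.Dict (Int × Int × Int × Int) Int) : PySem.Set (Int × Int × Int × Int) :=
  (candsOf occ).foldl (fun s q =>
    if nCount occ q == 3 || (nCount occ q == 2 && !(occ.getD q 0 == 0)) then PySem.Set.add s q
    else s) PySem.Set.empty

def part2_alt_step (occ : PySem.Dict (Int × Int × Int × Int) Int) :
    PySem.Dict (Int × Int × Int × Int) Int :=
  PySem.Dict.counter (newOf occ)

def part2_alt (actived : List (Int × Int × Int × Int)) : Int :=
  (((List.range 6).foldl (fun occ _ => part2_alt_step occ) (PySem.Dict.counter actived)).size : Int)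

-- ===== PRECONDITION & SPEC =====
def Spec_part2 (actived : List (Int × Int × Int × Int)) (out : Int) : Prop := out = part2_alt actived
instance (actived : List (Int × Int × Int × Int)) (out : Int) : Decidable (Spec_part2 actived out) := by unfold Spec_part2; infer_instance

-- ===== CLAIM (what is proved, stated in full; the proofs are below) =====
def Claim_equal_part2 : Prop := ∀ (actived : List (Int × Int × Int × Int)), Dom_part2 actived → Spec_part2 actived (part2 actived)

-- ===== LEMMAS AND PROOFS =====
abbrev Cell : Type := Int × Int × Int × Int

def subc (q c : Cell) : Cell := (q.1 - c.1, q.2.1 - c.2.1, q.2.2.1 - c.2.2.1, q.2.2.2 - c.2.2.2)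
def negc (o : Cell) : Cell := (-o.1, -o.2.1, -o.2.2.1, -o.2.2.2)

-- the multiset of neighbour marks A scatters
def nbrs (l : List Cell) : List Cell := l.flatMap (fun c => OFFS.map (addc c))
-- the number of active neighbours of q (with multiplicity)
def cnt (l : List Cell) (q : Cell) : Nat := l.countP (fun c => decide (subc q c ∈ OFFS))

lemma nodup_OFFS : OFFS.Nodup := by decide

lemma addc_eq_iff (c o q : Cell) : addc c o = q ↔ o = subc q c := by
  obtain ⟨a, b, e, f⟩ := c; obtain ⟨a', b', e', f'⟩ := o; obtain ⟨a2, b2, e2, f2⟩ := q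
  simp only [addc, subc, Prod.ext_iff]; constructor <;> (intro h; refine ⟨?_, ?_, ?_, ?_⟩ <;> omega)

lemma subc_eq_iff (c o q : Cell) : subc c q = o ↔ c = addc q o := by
  obtain ⟨a, b, e, f⟩ := c; obtain ⟨a', b', e', f'⟩ := o; obtain ⟨a2, b2, e2, f2⟩ := q
  simp only [addc, subc, Prod.ext_iff]; constructor <;> (intro h; refine ⟨?_, ?_, ?_, ?_⟩ <;> omega)

lemma negc_subc (q c : Cell) : negc (subc q c) = subc c q := by
  obtain ⟨a, b, e, f⟩ := c; obtain ⟨a2, b2, e2, f2⟩ := q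
  simp only [negc, subc, Prod.ext_iff]; refine ⟨?_, ?_, ?_, ?_⟩ <;> omega

lemma negc_negc (x : Cell) : negc (negc x) = x := by
  obtain ⟨a, b, e, f⟩ := x; simp [negc]

lemma neg_mem_OFFS (x : Cell) : negc x ∈ OFFS ↔ x ∈ OFFS := by
  have hperm : (OFFS.map negc).Perm OFFS := by decide
  constructor
  · intro h
    have h2 : negc (negc x) ∈ OFFS.map negc := List.mem_map_of_mem h
    rw [negc_negc] at h2; exact hperm.mem_iff.mp h2
  · intro h; exact hperm.mem_iff.mp (List.mem_map_of_mem h)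

-- the four nested literal loops of A are one loop over the 80 offsets
lemma foldl_flatMap' {α β γ : Type} (g : α → List β) (f : γ → β → γ) :
    ∀ (l : List α) (i : γ), (l.flatMap g).foldl f i = l.foldl (fun a c => (g c).foldl f a) i := by
  intro l
  induction l with
  | nil => simp
  | cons c t ih => intro i; simp [List.flatMap_cons, List.foldl_append, ih]

lemma foldl_filterMap' {α β γ : Type} (g : α → Option β) (f : γ → β → γ) :
    ∀ (l : List α) (i : γ), (l.filterMap g).foldl f i
      = l.foldl (fun a x => match g x with | none => a | some b => f a b) i := by
  intro l
  induction l with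
  | nil => simp
  | cons c t ih =>
    intro i
    rw [List.filterMap_cons]
    cases hx : g c <;> simp [hx, ih]

lemma inner_fold_eq (d : PySem.Dict Cell Int) (c : Cell) :
    dlist.foldl (fun d xi =>
      dlist.foldl (fun d yi =>
        dlist.foldl (fun d zi =>
          dlist.foldl (fun d wi =>
            if xi == 0 && yi == 0 && zi == 0 && wi == 0 then d
            else
              d.insert (c.1 + xi, c.2.1 + yi, c.2.2.1 + zi, c.2.2.2 + wi)
                (d.getD (c.1 + xi, c.2.1 + yi, c.2.2.1 + zi, c.2.2.2 + wi) 0 + 1)) d) d) d) d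
    = (OFFS.map (addc c)).foldl (fun d k => d.insert k (d.getD k 0 + 1)) d := by
  rw [List.foldl_map]
  unfold OFFS dlist
  rw [foldl_flatMap']
  apply PySem.List.foldl_congr_mem
  intro d1 xi _
  rw [foldl_flatMap']
  apply PySem.List.foldl_congr_mem
  intro d2 yi _
  rw [foldl_flatMap']
  apply PySem.List.foldl_congr_mem
  intro d3 zi _
  rw [foldl_filterMap']
  apply PySem.List.foldl_congr_mem
  intro d4 wi _
  by_cases h : (xi, yi, zi, wi) = ((0 : Int), (0 : Int), (0 : Int), (0 : Int))
  · rw [if_pos h]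
    obtain ⟨h1, h2, h3, h4⟩ : xi = 0 ∧ yi = 0 ∧ zi = 0 ∧ wi = 0 := by
      simpa [Prod.ext_iff] using h
    simp [h1, h2, h3, h4]
  · rw [if_neg h]
    have hnot : ¬(xi = 0 ∧ yi = 0 ∧ zi = 0 ∧ wi = 0) := by simpa [Prod.ext_iff] using h
    have hb : (xi == 0 && yi == 0 && zi == 0 && wi == 0) = false := by
      rw [Bool.eq_false_iff]
      intro hc
      simp only [Bool.and_eq_true, beq_iff_eq] at hc
      exact hnot (by tauto)
    rw [hb]
    rfl

lemma mark_eq (l : List Cell) :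
    markOf l = (nbrs l).foldl (fun d k => d.insert k (d.getD k 0 + 1)) PySem.Dict.empty := by
  unfold markOf nbrs
  rw [foldl_flatMap']
  exact PySem.List.foldl_congr_mem _ _ _ _
    (fun d c _ => by rw [inner_fold_eq, List.foldl_map])

lemma count_map_offs (c q : Cell) :
    (OFFS.map (addc c)).count q = if subc q c ∈ OFFS then 1 else 0 := by
  rw [List.count_eq_countP, List.countP_map]
  rw [List.countP_congr (q := fun o => o == subc q c)
    (by intro o _; simp [Function.comp, addc_eq_iff])]
  rw [← List.count_eq_countP]
  by_cases h : subc q c ∈ OFFS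
  · rw [if_pos h, List.count_eq_one_of_mem nodup_OFFS h]
  · rw [if_neg h, List.count_eq_zero_of_not_mem h]

lemma count_nbrs (l : List Cell) (q : Cell) : (nbrs l).count q = cnt l q := by
  induction l with
  | nil => simp [nbrs, cnt]
  | cons c t ih =>
    have h1 : nbrs (c :: t) = OFFS.map (addc c) ++ nbrs t := by simp [nbrs]
    rw [h1, List.count_append, count_map_offs, ih]
    simp only [cnt, List.countP_cons]
    by_cases h : subc q c ∈ OFFS
    · rw [if_pos h, if_pos (by simpa using h)]; omega
    · rw [if_neg h, if_neg (by simpa using h)]; omega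

lemma countP_or_disjoint {α : Type} (p q : α → Bool) :
    ∀ l : List α, (∀ x ∈ l, ¬(p x = true ∧ q x = true)) →
      l.countP (fun x => p x || q x) = l.countP p + l.countP q := by
  intro l
  induction l with
  | nil => simp
  | cons a t ih =>
    intro h
    have ht := ih (fun x hx => h x (List.mem_cons_of_mem _ hx))
    have ha := h a (List.mem_cons_self)
    simp only [List.countP_cons, ht]
    cases hp : p a <;> cases hq : q a <;> simp [hp, hq] at ha ⊢ <;> omega

lemma sum_counts (m : List Cell) (q : Cell) :
    ∀ os : List Cell, os.Nodup →
      (os.map (fun o => ((m.count (addc q o)) : Int))).sum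
        = (m.countP (fun c => decide (subc c q ∈ os)) : Int) := by
  intro os
  induction os with
  | nil => simp
  | cons o t ih =>
    intro h
    obtain ⟨hno, ht⟩ := List.nodup_cons.mp h
    rw [List.map_cons, List.sum_cons, ih ht]
    have h1 : m.countP (fun c => decide (subc c q ∈ o :: t))
        = m.countP (fun c => (c == addc q o) || decide (subc c q ∈ t)) := by
      apply List.countP_congr
      intro c _
      simp only [List.mem_cons, decide_eq_true_eq, Bool.or_eq_true, beq_iff_eq]
      constructor
      · rintro (h' | h')
        · exact Or.inl ((subc_eq_iff c o q).mp h')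
        · exact Or.inr h'
      · rintro (h' | h')
        · exact Or.inl ((subc_eq_iff c o q).mpr h')
        · exact Or.inr h'
    rw [h1, countP_or_disjoint]
    · rw [← List.count_eq_countP]; push_cast; ring
    · intro c _ hc
      obtain ⟨h2, h3⟩ := hc
      apply hno
      have hco : subc c q = o := (subc_eq_iff c o q).mpr (eq_of_beq h2)
      have h4 : subc c q ∈ t := of_decide_eq_true h3
      rwa [hco] at h4

lemma cnt_symm (m : List Cell) (q : Cell) :
    m.countP (fun c => decide (subc c q ∈ OFFS)) = cnt m q := by
  unfold cnt
  apply List.countP_congr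
  intro c _
  simp only [decide_eq_true_eq]
  rw [← negc_subc q c, neg_mem_OFFS]

-- membership / nodup through a fold of conditional set-adds
lemma mem_foldl_addif {β : Type} (P : β → Bool) (f : β → Cell) :
    ∀ (l : List β) (s : PySem.Set Cell) (y : Cell),
      y ∈ l.foldl (fun s b => if P b then PySem.Set.add s (f b) else s) s
        ↔ y ∈ s ∨ ∃ b ∈ l, P b = true ∧ y = f b := by
  intro l
  induction l with
  | nil => simp
  | cons b t ih =>
    intro s y
    rw [List.foldl_cons]
    cases hP : P b
    · rw [if_neg (by simp [hP]), ih]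
      simp [hP]
    · rw [if_pos (by simp [hP]), ih, PySem.Set.mem_add]
      simp [hP]
      tauto

lemma nodup_foldl_addgen {β : Type} (g : PySem.Set Cell → β → PySem.Set Cell)
    (hg : ∀ s b, g s b = s ∨ ∃ x, g s b = PySem.Set.add s x) :
    ∀ (l : List β) (s : PySem.Set Cell), s.Nodup → (l.foldl g s).Nodup := by
  intro l
  induction l with
  | nil => intro s hs; simpa
  | cons b t ih =>
    intro s hs
    rw [List.foldl_cons]
    apply ih
    rcases hg s b with h | ⟨x, h⟩
    · rwa [h]
    · rw [h]; exact PySem.Set.nodup_add s x hs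

lemma mem_cands_fold (ks : List Cell) (y : Cell) :
    ∀ s : PySem.Set Cell,
      y ∈ ks.foldl (fun s c => OFFS.foldl (fun s o => PySem.Set.add s (addc c o)) s) s
        ↔ y ∈ s ∨ ∃ c ∈ ks, ∃ o ∈ OFFS, y = addc c o := by
  induction ks with
  | nil => simp
  | cons c t ih =>
    intro s
    rw [List.foldl_cons, ih, PySem.Set.mem_foldl_add]
    constructor
    · rintro ((hs | ⟨o, ho, rfl⟩) | ⟨c', hc', rest⟩)
      · exact Or.inl hs
      · exact Or.inr ⟨c, List.mem_cons_self, o, ho, rfl⟩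
      · exact Or.inr ⟨c', List.mem_cons_of_mem _ hc', rest⟩
    · rintro (hs | ⟨c', hc', rest⟩)
      · exact Or.inl (Or.inl hs)
      · rcases List.mem_cons.mp hc' with rfl | hct
        · obtain ⟨o, ho, rfl⟩ := rest
          exact Or.inl (Or.inr ⟨o, ho, rfl⟩)
        · exact Or.inr ⟨c', hct, rest⟩

-- ===== the two step functions agree (up to permutation) =====
lemma getD_mark (l : List Cell) (q : Cell) : (markOf l).getD q 0 = (cnt l q : Int) := by
  rw [mark_eq, PySem.Dict.getD_foldl_insert_add_one, PySem.Dict.getD_empty, count_nbrs]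
  ring

lemma keys_mark (l : List Cell) : (markOf l).keys = PySem.Set.ofList (nbrs l) := by
  rw [mark_eq, PySem.Dict.keys_foldl_insert (f := fun d x => d.getD x 0 + 1)]
  rw [PySem.Dict.keys_empty, PySem.Set.update_nil_left]

lemma mem_stepA (l : List Cell) (q : Cell) :
    q ∈ part2_step l ↔ (cnt l q = 3 ∨ (cnt l q = 2 ∧ q ∈ l)) := by
  have hnodupk : (markOf l).keys.Nodup := by
    rw [keys_mark]; exact PySem.Set.nodup_ofList _
  have hbody : part2_step l
      = (markOf l).items.foldl (fun s kv =>
          if (kv.2 == 3 || (kv.2 == 2 && l.contains kv.1)) then PySem.Set.add s kv.1 else s)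
        PySem.Set.empty := by
    unfold part2_step
    apply PySem.List.foldl_congr_mem
    intro s kv _
    cases h3 : (kv.2 == 3) <;> cases h2 : (kv.2 == 2 && l.contains kv.1) <;> simp
  rw [hbody, mem_foldl_addif (P := fun kv => kv.2 == 3 || (kv.2 == 2 && l.contains kv.1)) (f := Prod.fst)]
  rw [PySem.Dict.items_eq_map_keys _ hnodupk 0, keys_mark]
  have hmemn : ∀ v, v ∈ nbrs l ↔ 0 < cnt l v := by
    intro v; rw [← count_nbrs, List.count_pos_iff]
  constructor
  · rintro (h | ⟨kv, hkv, hP, hy⟩)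
    · simp [PySem.Set.empty] at h
    · obtain ⟨k, hk, rfl⟩ := List.mem_map.mp hkv
      rw [PySem.Set.mem_ofList] at hk
      subst hy
      simp only [getD_mark] at hP
      simp only [Bool.or_eq_true, Bool.and_eq_true, beq_iff_eq, List.contains_iff_mem] at hP
      rcases hP with h3 | ⟨h2, hin⟩
      · left; omega
      · right; exact ⟨by omega, hin⟩
  · intro h
    right
    have hq : q ∈ nbrs l := by
      rw [hmemn]; rcases h with h | ⟨h, _⟩ <;> omega
    refine ⟨(q, (markOf l).getD q 0), List.mem_map.mpr ⟨q, (PySem.Set.mem_ofList _ _).mpr hq, rfl⟩, ?_, rfl⟩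
    simp only [getD_mark]
    simp only [Bool.or_eq_true, Bool.and_eq_true, beq_iff_eq, List.contains_iff_mem]
    rcases h with h | ⟨h, hin⟩
    · left; omega
    · right; exact ⟨by omega, hin⟩

lemma nCount_counter (m : List Cell) (q : Cell) : nCount (PySem.Dict.counter m) q = (cnt m q : Int) := by
  unfold nCount
  rw [PySem.List.foldl_add (g := fun o => (PySem.Dict.counter m).getD (addc q o) 0), zero_add]
  have h1 : OFFS.map (fun o => (PySem.Dict.counter m).getD (addc q o) 0)
      = OFFS.map (fun o => ((m.count (addc q o)) : Int)) := by
    apply List.map_congr_left; intro o _; rw [PySem.Dict.getD_counter]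
  rw [h1, sum_counts m q OFFS nodup_OFFS, cnt_symm]

lemma mem_stepB (m : List Cell) (q : Cell) :
    q ∈ newOf (PySem.Dict.counter m) ↔ (cnt m q = 3 ∨ (cnt m q = 2 ∧ q ∈ m)) := by
  unfold newOf
  rw [mem_foldl_addif
    (P := fun q => nCount (PySem.Dict.counter m) q == 3
      || (nCount (PySem.Dict.counter m) q == 2 && !((PySem.Dict.counter m).getD q 0 == 0)))
    (f := fun q => q)]
  have hcands : ∀ y, y ∈ candsOf (PySem.Dict.counter m) ↔ 0 < cnt m y := by
    intro y
    unfold candsOf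
    rw [mem_cands_fold, PySem.Dict.keys_counter]
    constructor
    · rintro (h | ⟨c, hc, o, ho, rfl⟩)
      · simp [PySem.Set.empty] at h
      · rw [PySem.Set.mem_ofList] at hc
        have : subc (addc c o) c ∈ OFFS := by
          rw [← (addc_eq_iff c o (addc c o)).mp rfl]; exact ho
        unfold cnt
        rw [List.countP_pos_iff]
        exact ⟨c, hc, by simpa⟩
    · intro h
      unfold cnt at h
      rw [List.countP_pos_iff] at h
      obtain ⟨c, hc, hoff⟩ := h
      right
      exact ⟨c, (PySem.Set.mem_ofList _ _).mpr hc, subc y c, of_decide_eq_true hoff,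
        ((addc_eq_iff c (subc y c) y).mpr rfl).symm⟩
  constructor
  · rintro (h | ⟨b, hb, hP, rfl⟩)
    · simp [PySem.Set.empty] at h
    · simp only [nCount_counter, PySem.Dict.getD_counter, Bool.or_eq_true, Bool.and_eq_true,
        beq_iff_eq, Bool.not_eq_true', beq_eq_false_iff_ne, ne_eq] at hP
      rcases hP with h3 | ⟨h2, hm⟩
      · left; omega
      · right
        refine ⟨by omega, ?_⟩
        rw [← List.count_pos_iff]
        omega
  · intro h
    have hc : 0 < cnt m q := by rcases h with h | ⟨h, _⟩ <;> omega
    refine Or.inr ⟨q, (hcands q).mpr hc, ?_, rfl⟩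
    simp only [nCount_counter, PySem.Dict.getD_counter, Bool.or_eq_true, Bool.and_eq_true,
        beq_iff_eq, Bool.not_eq_true', beq_eq_false_iff_ne, ne_eq]
    rcases h with h3 | ⟨h2, hm⟩
    · left; omega
    · right
      have := List.count_pos_iff.mpr hm
      exact ⟨by omega, by omega⟩

lemma nodup_stepA (l : List Cell) : (part2_step l).Nodup := by
  unfold part2_step
  apply nodup_foldl_addgen
  · intro s kv
    cases h3 : (kv.2 == 3)
    · cases h2 : (kv.2 == 2 && l.contains kv.1)
      · left; rw [if_neg (by simp), if_neg (by simp)]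
      · right; exact ⟨kv.1, by rw [if_neg (by simp), if_pos (by simp)]⟩
    · right; exact ⟨kv.1, by rw [if_pos (by simp)]⟩
  · simp [PySem.Set.empty]

lemma nodup_stepB (occ : PySem.Dict Cell Int) : (newOf occ).Nodup := by
  unfold newOf
  apply nodup_foldl_addgen
  · intro s q
    cases h : (nCount occ q == 3 || (nCount occ q == 2 && !(occ.getD q 0 == 0)))
    · left; rw [if_neg (by simp)]
    · right; exact ⟨q, by rw [if_pos (by simp)]⟩
  · simp [PySem.Set.empty]

lemma perm_step {l m : List Cell} (h : l.Perm m) :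
    (part2_step l).Perm (newOf (PySem.Dict.counter m)) := by
  rw [List.perm_ext_iff_of_nodup (nodup_stepA l) (nodup_stepB _)]
  intro q
  rw [mem_stepA, mem_stepB]
  have hc : cnt l q = cnt m q := h.countP_eq _
  rw [hc, h.mem_iff]

-- the two iterations, run side by side
def altIter : Nat → List Cell → List Cell
  | 0, m => m
  | n + 1, m => newOf (PySem.Dict.counter (altIter n m))

lemma iter_eq (n : Nat) : ∀ (l m : List Cell), l.Perm m →
    (((List.range n).foldl (fun a _ => part2_step a) l).Perm (altIter n m)) ∧
    ((List.range n).foldl (fun occ _ => part2_alt_step occ) (PySem.Dict.counter m)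
      = PySem.Dict.counter (altIter n m)) := by
  induction n with
  | zero => intro l m h; simpa [altIter] using h
  | succ k ih =>
    intro l m h
    obtain ⟨h1, h2⟩ := ih l m h
    rw [List.range_succ, List.foldl_append, List.foldl_append]
    constructor
    · simpa [altIter] using perm_step h1
    · simp only [List.foldl_cons, List.foldl_nil, h2]
      rfl

lemma size_counter_nodup (x : List Cell) (hx : x.Nodup) :
    (PySem.Dict.counter x).size = x.length := by
  have : (PySem.Dict.counter x).items = x.map (fun k => (k, (x.count k : Int))) := by
    rw [PySem.Dict.items_counter, PySem.Set.ofList_eq_self_of_nodup _ hx]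
  simp [PySem.Dict.size, this]

-- ===== VERDICT (by name: the statement is the Claim_ definition above) =====
theorem part2_spec : Claim_equal_part2 := by
  unfold Claim_equal_part2
  intro actived _
  unfold Spec_part2 part2 part2_alt
  obtain ⟨h1, h2⟩ := iter_eq 6 actived actived (List.Perm.refl _)
  rw [h2]
  have hnodup : (altIter 6 actived).Nodup := nodup_stepB _
  rw [size_counter_nodup _ hnodup]
  have hlen := h1.length_eq
  simp only [PySem.List.len_eq]
  omega
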